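-- pv_equiv track=rewrite | github.com/lew1464313834-ctrl/DES | src/generate_cso_attacker/generate_ACAG_helper.py | cal_unobservable_reach_supervisor
-- ===== SOURCE A (Python) =====
-- from collections import deque
--
-- def cal_unobservable_reach_supervisor(states_current_estimation,
--                                       transition,
--                                       events_unobeservable,
--                                       max_depth=15):
--     state_next_estiamtion_supervisor = set(states_current_estimation)
--     queue = deque([(s, 0) for s in states_current_estimation])
--
--     while queue:
--         curr_state, depth = queue.popleft()
--         if depth >= max_depth:
--             continue
--         # 搜索所有以当前预估为起点的不可观测转移
--         for (src, event), target in transition.items():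
--             if src == curr_state and event in events_unobeservable:
--                 if target not in state_next_estiamtion_supervisor:
--                     state_next_estiamtion_supervisor.add(target)
--                     queue.append((target, depth + 1))
--     return frozenset(state_next_estiamtion_supervisor)
-- ===== SOURCE B (Python) =====
-- from collections import deque
--
-- def cal_unobservable_reach_supervisor(states_current_estimation,
--                                       transition,
--                                       events_unobeservable,
--                                       max_depth=15):
--     # Build src -> list-of-unobservable-targets adjacency once, then BFS over it.
--     unobs = set(events_unobeservable)
--     adj = {}
--     for (src, event), target in transition.items():
--         if event in unobs:
--             adj.setdefault(src, []).append(target)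
--
--     reached = set(states_current_estimation)
--     queue = deque((s, 0) for s in states_current_estimation)
--     while queue:
--         state, depth = queue.popleft()
--         if depth >= max_depth:
--             continue
--         for target in adj.get(state, ()):
--             if target not in reached:
--                 reached.add(target)
--                 queue.append((target, depth + 1))
--     return frozenset(reached)
-- ===== Notes on version B (the rewrite author's own statement) =====
-- stated objective: faster
-- what changed: B precomputes a src -> unobservable-target adjacency dict in one pass over the transitions and runs the depth-bounded BFS over that dict, so the per-popped-state rescan of the whole transition table in A disappears.
import Mathlib
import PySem

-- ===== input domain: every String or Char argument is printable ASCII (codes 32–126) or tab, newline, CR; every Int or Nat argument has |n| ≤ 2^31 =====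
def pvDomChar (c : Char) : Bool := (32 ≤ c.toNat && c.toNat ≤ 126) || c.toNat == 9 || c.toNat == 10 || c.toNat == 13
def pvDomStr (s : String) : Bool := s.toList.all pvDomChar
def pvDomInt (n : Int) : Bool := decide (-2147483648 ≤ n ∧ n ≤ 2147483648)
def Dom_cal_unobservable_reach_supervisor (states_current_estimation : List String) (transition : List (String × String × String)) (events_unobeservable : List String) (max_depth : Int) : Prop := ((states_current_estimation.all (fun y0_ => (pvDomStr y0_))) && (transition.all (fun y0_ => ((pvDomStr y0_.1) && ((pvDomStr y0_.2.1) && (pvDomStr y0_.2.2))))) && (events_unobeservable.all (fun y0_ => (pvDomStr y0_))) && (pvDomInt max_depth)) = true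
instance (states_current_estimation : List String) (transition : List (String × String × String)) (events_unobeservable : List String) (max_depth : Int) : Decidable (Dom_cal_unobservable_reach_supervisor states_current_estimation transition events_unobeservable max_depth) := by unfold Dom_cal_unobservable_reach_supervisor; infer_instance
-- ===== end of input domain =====

-- B replaces A's per-popped-state rescan of the whole transition table by a src → unobservable-target
-- adjacency dict built once, then runs the same depth-bounded BFS over that dict (objective: faster).

-- Termination machinery shared by both BFS loops (cited by the ports' decreasing_by):
-- the measure is the number of not-yet-seen candidate targets (counted with multiplicity) plus the queue length.
def pvU (univ : List String) (seen : List String) : Nat :=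
  (univ.filter (fun t => !(seen.contains t))).length

theorem pv_length_filter_lt {α : Type} (l : List α) (p q : α → Bool)
    (h : ∀ x ∈ l, p x = true → q x = true) (a : α) (ha : a ∈ l)
    (hq : q a = true) (hp : p a = false) :
    (l.filter p).length < (l.filter q).length := by
  induction l with
  | nil => cases ha
  | cons y ys ih =>
    have hmono : (ys.filter p).length ≤ (ys.filter q).length := by
      rw [← List.countP_eq_length_filter, ← List.countP_eq_length_filter]
      exact List.countP_mono_left (fun x hx => h x (List.mem_cons_of_mem _ hx))
    simp only [List.filter_cons]
    rcases List.mem_cons.1 ha with rfl | hy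
    · rw [hp, hq]
      simpa using Nat.lt_succ_of_le hmono
    · have hlt := ih (fun x hx => h x (List.mem_cons_of_mem _ hx)) hy
      by_cases hpy : p y = true
      · rw [hpy, h y (List.mem_cons_self ..) hpy]
        simpa using Nat.succ_lt_succ hlt
      · rw [Bool.not_eq_true] at hpy
        rw [hpy]
        cases hqy : q y <;> simp <;> omega
  
theorem pvU_append_lt (univ seen : List String) (t : String)
    (ht : t ∈ univ) (hc : seen.contains t = false) :
    pvU univ (seen ++ [t]) < pvU univ seen := by
  apply pv_length_filter_lt univ _ _ _ t ht
  · simpa using hc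
  · simp
  · intro x _ hx
    simp only [Bool.not_eq_eq_eq_not, Bool.not_true, List.contains_append,
      Bool.or_eq_false_iff] at hx
    simpa using hx.1

theorem pvFold_bound {β : Type} (univ : List String)
    (f : (List String × List (String × Int)) → β → (List String × List (String × Int))) :
    ∀ (L : List β),
      (∀ st b, b ∈ L → f st b = st ∨
        ∃ t x, t ∈ univ ∧ st.1.contains t = false ∧ f st b = (st.1 ++ [t], st.2 ++ [x])) →
      ∀ st : List String × List (String × Int),
        pvU univ (L.foldl f st).1 + (L.foldl f st).2.length ≤ pvU univ st.1 + st.2.length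
  | [], _, st => le_refl _
  | b :: L, hf, st => by
    simp only [List.foldl_cons]
    have hrec := pvFold_bound univ f L
      (fun st' b' hb' => hf st' b' (List.mem_cons_of_mem _ hb')) (f st b)
    rcases hf st b (List.mem_cons_self ..) with h | ⟨t, x, htu, hcont, heq⟩
    · rw [h] at hrec ⊢; exact hrec
    · rw [heq] at hrec ⊢
      have hlt := pvU_append_lt univ st.1 t htu hcont
      simp only [List.length_append, List.length_cons, List.length_nil] at hrec
      omega

theorem pv_getD_flatten (adj : PySem.Dict String (List String)) (k t : String)
    (ht : t ∈ adj.getD k []) : t ∈ adj.values.flatten := by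
  rw [PySem.Dict.getD_eq_get?_getD] at ht
  rcases hk : adj.get? k with _ | v
  · rw [hk] at ht
    simp at ht
  · rw [hk] at ht
    simp only [Option.getD_some] at ht
    have hmem : (k, v) ∈ adj.items := PySem.Dict.mem_items_of_get?_eq_some adj hk
    exact List.mem_flatten.2 ⟨v, List.mem_map.2 ⟨(k, v), hmem, rfl⟩, ht⟩

-- ===== PORT A =====
-- inner 'for (src, event), target in transition.items(): …' body
def pvStepA (events_unobeservable : List String) (curr : String) (depth : Int)
    (st : List String × List (String × Int)) (tr : String × String × String) :
    List String × List (String × Int) :=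
  if tr.1 == curr && events_unobeservable.contains tr.2.1 then
    if !(PySem.Set.contains st.1 tr.2.2) then
      (PySem.Set.add st.1 tr.2.2, st.2 ++ [(tr.2.2, depth + 1)])
    else st
  else st

-- 'while queue: …' — pops the front, rescans the whole transition list
def pvLoopA (transition : List (String × String × String)) (events_unobeservable : List String)
    (max_depth : Int) : List String → List (String × Int) → List String
  | seen, [] => seen
  | seen, (curr, depth) :: rest =>
    if max_depth ≤ depth then
      pvLoopA transition events_unobeservable max_depth seen rest
    else
      let r := transition.foldl (pvStepA events_unobeservable curr depth) (seen, rest)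
      pvLoopA transition events_unobeservable max_depth r.1 r.2
  termination_by seen queue => pvU (transition.map (fun tr => tr.2.2)) seen + queue.length
  decreasing_by
  · simp only [List.length_cons]; omega
  · have hb := pvFold_bound (transition.map (fun tr => tr.2.2))
      (pvStepA events_unobeservable curr depth) transition
      (by
        intro st b hb
        unfold pvStepA
        by_cases h1 : (b.1 == curr && events_unobeservable.contains b.2.1) = true
        · rw [if_pos h1]
          by_cases h2 : PySem.Set.contains st.1 b.2.2 = true
          · left; rw [h2]; simp
          · right
            rw [Bool.not_eq_true] at h2
            refine ⟨b.2.2, (b.2.2, depth + 1), List.mem_map.2 ⟨b, hb, rfl⟩, by simpa using h2, ?_⟩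
            rw [h2]
            simp only [Bool.not_false, if_pos]
            have : PySem.Set.add st.1 b.2.2 = st.1 ++ [b.2.2] :=
              PySem.Set.add_of_not_mem (by simpa using h2)
            rw [this]
        · rw [if_neg h1]; left; rfl)
      (seen, rest)
    dsimp only at hb
    simp only [List.foldl_attach, List.length_cons]
    omega

def cal_unobservable_reach_supervisor (states_current_estimation : List String) (transition : List (String × String × String)) (events_unobeservable : List String) (max_depth : Int) : List String :=
  pvLoopA transition events_unobeservable max_depth
    (PySem.Set.ofList states_current_estimation)
    (states_current_estimation.map (fun s => (s, (0 : Int))))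

-- ===== PORT B =====
-- 'adj.setdefault(src, []).append(target)' over the transition items, unobservable events only
def pvAdj (transition : List (String × String × String)) (events_unobeservable : List String) :
    PySem.Dict String (List String) :=
  let unobs := PySem.Set.ofList events_unobeservable
  transition.foldl
    (fun adj tr =>
      if PySem.Set.contains unobs tr.2.1 then
        adj.insert tr.1 (adj.getD tr.1 [] ++ [tr.2.2])
      else adj)
    PySem.Dict.empty

-- inner 'for target in adj.get(state, ()): …' body
def pvStepB (depth : Int) (st : List String × List (String × Int)) (t : String) :
    List String × List (String × Int) :=
  if !(PySem.Set.contains st.1 t) then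
    (PySem.Set.add st.1 t, st.2 ++ [(t, depth + 1)])
  else st

-- 'while queue: …' — pops the front, scans only the popped state's adjacency list
def pvLoopB (adj : PySem.Dict String (List String)) (max_depth : Int) :
    List String → List (String × Int) → List String
  | seen, [] => seen
  | seen, (state, depth) :: rest =>
    if max_depth ≤ depth then
      pvLoopB adj max_depth seen rest
    else
      let r := (adj.getD state []).foldl (pvStepB depth) (seen, rest)
      pvLoopB adj max_depth r.1 r.2
  termination_by seen queue => pvU adj.values.flatten seen + queue.length
  decreasing_by
  · simp only [List.length_cons]; omega
  · have hb := pvFold_bound adj.values.flatten (pvStepB depth) (adj.getD state [])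
      (by
        intro st b hb
        unfold pvStepB
        by_cases h2 : PySem.Set.contains st.1 b = true
        · left; rw [h2]; simp
        · right
          rw [Bool.not_eq_true] at h2
          refine ⟨b, (b, depth + 1), pv_getD_flatten adj state b hb, by simpa using h2, ?_⟩
          rw [h2]
          simp only [Bool.not_false, if_pos]
          have : PySem.Set.add st.1 b = st.1 ++ [b] :=
            PySem.Set.add_of_not_mem (by simpa using h2)
          rw [this])
      (seen, rest)
    dsimp only at hb
    simp only [List.foldl_attach, List.length_cons]
    omega

def cal_unobservable_reach_supervisor_alt (states_current_estimation : List String) (transition : List (String × String × String)) (events_unobeservable : List String) (max_depth : Int) : List String :=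
  pvLoopB (pvAdj transition events_unobeservable) max_depth
    (PySem.Set.ofList states_current_estimation)
    (states_current_estimation.map (fun s => (s, (0 : Int))))

-- ===== PRECONDITION & SPEC =====
def Spec_cal_unobservable_reach_supervisor (states_current_estimation : List String) (transition : List (String × String × String)) (events_unobeservable : List String) (max_depth : Int) (out : List String) : Prop := out = cal_unobservable_reach_supervisor_alt states_current_estimation transition events_unobeservable max_depth
instance (states_current_estimation : List String) (transition : List (String × String × String)) (events_unobeservable : List String) (max_depth : Int) (out : List String) : Decidable (Spec_cal_unobservable_reach_supervisor states_current_estimation transition events_unobeservable max_depth out) := by unfold Spec_cal_unobservable_reach_supervisor; infer_instance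

-- ===== CLAIM (what is proved, stated in full; the proofs are below) =====
def Claim_equal_cal_unobservable_reach_supervisor : Prop := ∀ (states_current_estimation : List String) (transition : List (String × String × String)) (events_unobeservable : List String) (max_depth : Int), Dom_cal_unobservable_reach_supervisor states_current_estimation transition events_unobeservable max_depth → Spec_cal_unobservable_reach_supervisor states_current_estimation transition events_unobeservable max_depth (cal_unobservable_reach_supervisor states_current_estimation transition events_unobeservable max_depth)

-- ===== LEMMAS AND PROOFS =====

-- membership in set(xs) is membership in xs
theorem pv_contains_ofList (E : List String) (x : String) :
    (PySem.Set.ofList E).contains x = E.contains x := by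
  by_cases h : x ∈ E
  · simp [PySem.Set.mem_ofList, h]
  · simp [PySem.Set.mem_ofList, h]

-- the adjacency list for state c collects, in transition order, the targets of
-- the unobservable transitions leaving c
theorem pvAdj_getD (E : List String) (c : String) :
    ∀ (T : List (String × String × String)) (dct : PySem.Dict String (List String)),
      (T.foldl
        (fun adj tr =>
          if PySem.Set.contains (PySem.Set.ofList E) tr.2.1 then
            adj.insert tr.1 (adj.getD tr.1 [] ++ [tr.2.2])
          else adj) dct).getD c []
      = dct.getD c []
        ++ (T.filter (fun tr => tr.1 == c && (PySem.Set.ofList E).contains tr.2.1)).map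
            (fun tr => tr.2.2)
  | [], dct => by simp
  | tr :: T, dct => by
    simp only [List.foldl_cons, List.filter_cons]
    by_cases hev : PySem.Set.contains (PySem.Set.ofList E) tr.2.1 = true
    · rw [if_pos hev, pvAdj_getD E c T _]
      by_cases hc : (tr.1 == c) = true
      · have hc' : tr.1 = c := by simpa using hc
        have hmem : tr.2.1 ∈ E := by simpa using hev
        simp [hc', hmem]
      · have hne : c ≠ tr.1 := fun hh => hc (by simp [hh])
        have hcf : (tr.1 == c) = false := by simpa using hc
        simp [PySem.Dict.getD_insert, hne, hcf]
    · have hevf : PySem.Set.contains (PySem.Set.ofList E) tr.2.1 = false := by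
        simpa using hev
      rw [if_neg (by rw [hevf]; exact Bool.false_ne_true), pvAdj_getD E c T dct, hevf]
      simp

-- A's full-table scan for a popped state equals B's scan of that state's adjacency list
theorem pvFoldA_eq (E : List String) (c : String) (d : Int) :
    ∀ (T : List (String × String × String)) (st : List String × List (String × Int)),
      T.foldl (pvStepA E c d) st
        = ((T.filter (fun tr => tr.1 == c && E.contains tr.2.1)).map
            (fun tr => tr.2.2)).foldl (pvStepB d) st
  | [], st => rfl
  | tr :: T, st => by
    simp only [List.foldl_cons, List.filter_cons]
    by_cases h : (tr.1 == c && E.contains tr.2.1) = true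
    · have hstep : pvStepA E c d st tr = pvStepB d st tr.2.2 := by
        unfold pvStepA pvStepB
        rw [if_pos h]
      rw [if_pos h, List.map_cons, List.foldl_cons, hstep]
      exact pvFoldA_eq E c d T _
    · have hf : (tr.1 == c && E.contains tr.2.1) = false := by simpa using h
      have hstep : pvStepA E c d st tr = st := by
        unfold pvStepA
        rw [if_neg (by rw [hf]; exact Bool.false_ne_true)]
      rw [if_neg (by rw [hf]; exact Bool.false_ne_true), hstep]
      exact pvFoldA_eq E c d T st

theorem pvLoop_eq (T : List (String × String × String)) (E : List String) (md : Int) :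
    ∀ (seen : List String) (q : List (String × Int)),
      pvLoopA T E md seen q = pvLoopB (pvAdj T E) md seen q := by
  intro seen q
  induction seen, q using pvLoopA.induct T E md with
  | case1 seen => rw [pvLoopA, pvLoopB]
  | case2 seen curr depth rest h ih =>
    rw [pvLoopA, pvLoopB, if_pos h, if_pos h, ih]
  | case3 seen curr depth rest h r ih =>
    have hadj : ((pvAdj T E).getD curr [])
        = (T.filter (fun tr => tr.1 == curr && E.contains tr.2.1)).map (fun tr => tr.2.2) := by
      have h1 := pvAdj_getD E curr T PySem.Dict.empty
      have h2 : T.filter (fun tr => tr.1 == curr && (PySem.Set.ofList E).contains tr.2.1)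
          = T.filter (fun tr => tr.1 == curr && E.contains tr.2.1) :=
        List.filter_congr (fun x _ => by rw [pv_contains_ofList])
      rw [h2] at h1
      simpa [pvAdj, PySem.Dict.getD_empty] using h1
    have hfold : List.foldl (pvStepA E curr depth) (seen, rest) T
        = List.foldl (pvStepB depth) (seen, rest) ((pvAdj T E).getD curr []) := by
      rw [hadj, pvFoldA_eq]
    rw [pvLoopA, pvLoopB, if_neg h, if_neg h]
    have hr : r = List.foldl (pvStepA E curr depth) (seen, rest) T := by
      show List.foldl (fun s x => pvStepA E curr depth s x.1) (seen, rest) T.attach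
          = List.foldl (pvStepA E curr depth) (seen, rest) T
      simp
    rw [hr, hfold] at ih
    simp only [hfold]
    exact ih

-- ===== VERDICT (by name: the statement is the Claim_ definition above) =====
theorem cal_unobservable_reach_supervisor_spec : Claim_equal_cal_unobservable_reach_supervisor := by
  intro s T E md _
  unfold Spec_cal_unobservable_reach_supervisor
  unfold cal_unobservable_reach_supervisor cal_unobservable_reach_supervisor_alt
  exact pvLoop_eq T E md _ _
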